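-- pv_equiv track=rewrite | github.com/JadilsonJR/Python | Questoes/ex5/ex5.2 .py | calculadistanciabandapercorre
-- ===== SOURCE A (Python) =====
-- def calculadistanciabandapercorre(numerorodadaensaios,numeroshows):
--     num_ens = numerorodadaensaios
--     num_show= numeroshows
--     i=0
--     x=0
--     rodada=0
--     p=0
--     while i != num_ens:
--         rodada= rodada + (140*250)
--         i+=1
--     while x != num_show:
--         p= p + (42*250)
--         x+=1
--     res=rodada+p
--     return res
--     pass
-- ===== SOURCE B (Python) =====
-- def calculadistanciabandapercorre(numerorodadaensaios, numeroshows):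
--     return numerorodadaensaios * 35000 + numeroshows * 10500
-- ===== Notes on version B (the rewrite author's own statement) =====
-- stated objective: faster
-- what changed: Replaces the two counting while-loops (adding 140*250 per rehearsal round and 42*250 per show) by the closed-form product num_ens*35000 + num_show*10500.
-- outside the precondition, e.g. on calculadistanciabandapercorre(-1, 0): A does not finish within the time limit, B returns -35000
import Mathlib
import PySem

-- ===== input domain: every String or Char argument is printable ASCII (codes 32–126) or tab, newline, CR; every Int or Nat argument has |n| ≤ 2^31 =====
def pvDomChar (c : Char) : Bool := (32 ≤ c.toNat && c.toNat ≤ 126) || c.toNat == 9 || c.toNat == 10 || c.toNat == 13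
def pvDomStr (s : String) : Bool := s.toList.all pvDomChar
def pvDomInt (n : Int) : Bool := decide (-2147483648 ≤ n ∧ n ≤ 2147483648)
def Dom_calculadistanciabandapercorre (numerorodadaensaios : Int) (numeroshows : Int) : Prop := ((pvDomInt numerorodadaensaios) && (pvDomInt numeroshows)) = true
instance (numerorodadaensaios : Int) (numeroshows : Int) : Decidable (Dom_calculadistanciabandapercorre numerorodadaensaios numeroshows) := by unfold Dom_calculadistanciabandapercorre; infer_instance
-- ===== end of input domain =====

-- B replaces A's two counting while-loops by the closed form n*35000 + m*10500 (faster; O(1) vs O(n+m)).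

-- ===== PORT A =====
-- A's `while i != target` loop, counting i up by 1 and adding `step` each round.
-- The `target < i` branch is only a totality guard: Python diverges there and Pre_ excludes it.
def pvWhileNe (i target acc step : Int) : Int :=
  if i = target then acc
  else if target < i then acc
  else pvWhileNe (i + 1) target (acc + step) step
termination_by (target - i).toNat
decreasing_by
  have h1 : i < target := by omega
  omega

def calculadistanciabandapercorre (numerorodadaensaios : Int) (numeroshows : Int) : Int :=
  let num_ens := numerorodadaensaios
  let num_show := numeroshows
  let rodada := pvWhileNe 0 num_ens 0 (140 * 250)
  let p := pvWhileNe 0 num_show 0 (42 * 250)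
  rodada + p

-- ===== PORT B =====
def calculadistanciabandapercorre_alt (numerorodadaensaios : Int) (numeroshows : Int) : Int :=
  numerorodadaensaios * 35000 + numeroshows * 10500

-- ===== PRECONDITION & SPEC =====
-- Pre_ excludes negative counts: there A's `while i != n` loops never terminate (Python diverges).
def Pre_calculadistanciabandapercorre (numerorodadaensaios : Int) (numeroshows : Int) : Prop :=
  0 ≤ numerorodadaensaios ∧ 0 ≤ numeroshows
instance (numerorodadaensaios : Int) (numeroshows : Int) : Decidable (Pre_calculadistanciabandapercorre numerorodadaensaios numeroshows) := by unfold Pre_calculadistanciabandapercorre; infer_instance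
def pvWitness_calculadistanciabandapercorre : Int × Int := (3, 2)

def Spec_calculadistanciabandapercorre (numerorodadaensaios : Int) (numeroshows : Int) (out : Int) : Prop := out = calculadistanciabandapercorre_alt numerorodadaensaios numeroshows
instance (numerorodadaensaios : Int) (numeroshows : Int) (out : Int) : Decidable (Spec_calculadistanciabandapercorre numerorodadaensaios numeroshows out) := by unfold Spec_calculadistanciabandapercorre; infer_instance

-- ===== CLAIM (what is proved, stated in full; the proofs are below) =====
def Claim_equal_calculadistanciabandapercorre : Prop := ∀ (numerorodadaensaios : Int) (numeroshows : Int), Dom_calculadistanciabandapercorre numerorodadaensaios numeroshows → Pre_calculadistanciabandapercorre numerorodadaensaios numeroshows → Spec_calculadistanciabandapercorre numerorodadaensaios numeroshows (calculadistanciabandapercorre numerorodadaensaios numeroshows)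

-- ===== LEMMAS AND PROOFS =====
-- Loop characterisation: starting at i ≤ target, the loop returns acc + (target - i) * step.
theorem pvWhileNe_closed (i target acc step : Int) (h : i ≤ target) :
    pvWhileNe i target acc step = acc + (target - i) * step := by
  have hn : (target - i).toNat = target - i := by omega
  generalize hk : (target - i).toNat = k
  induction k generalizing i acc with
  | zero =>
    have : i = target := by omega
    rw [pvWhileNe, if_pos this]
    simp [this]
  | succ n ih =>
    have hlt : i < target := by omega
    rw [pvWhileNe, if_neg (by omega), if_neg (by omega)]
    rw [ih (i + 1) (acc + step) (by omega) (by omega) (by omega)]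
    ring

-- ===== VERDICT (by name: the statement is the Claim_ definition above) =====
theorem calculadistanciabandapercorre_spec : Claim_equal_calculadistanciabandapercorre := by
  intro n m _ hpre
  unfold Spec_calculadistanciabandapercorre calculadistanciabandapercorre calculadistanciabandapercorre_alt
  obtain ⟨hn, hm⟩ := hpre
  simp only
  rw [pvWhileNe_closed 0 n 0 (140 * 250) hn, pvWhileNe_closed 0 m 0 (42 * 250) hm]
  ring
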